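-- pv_equiv track=rewrite | github.com/RileyPaddock/machine-learning | analysis/signal_seperation.py | add_terms_a
-- ===== SOURCE A (Python) =====
-- def add_terms_a(data, degree):
--     adjusted_data = [[data[x][0]**i for i in range(degree+1)] + [data[x][1]] for x in range(len(data))]
--     data_dict = {}
--     for x in range(len(adjusted_data)):
--         for y in range(len(adjusted_data[0])):
--             if str(y) in data_dict:
--                 data_dict[str(y)].append(adjusted_data[x][y])
--             else:
--                 data_dict[str(y)] = [adjusted_data[x][y]]
--     return data_dict
-- ===== SOURCE B (Python) =====
-- def add_terms_a(data, degree):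
--     # column-by-column: k power columns 0..k-1, then the label column at key str(k)
--     if not data:
--         return {}
--     k = max(degree + 1, 0)
--     cols = {str(j): [row[0] ** j for row in data] for j in range(k)}
--     cols[str(k)] = [row[1] for row in data]
--     return cols
-- ===== Notes on version B (the rewrite author's own statement) =====
-- stated objective: simpler
-- what changed: B builds each output column directly (one list per key, plus the final label column) instead of materialising the per-row feature matrix and transposing it through a dict-append double loop; rows with fewer than 2 entries, where A raises IndexError, are excluded by Pre_.
import Mathlib
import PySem

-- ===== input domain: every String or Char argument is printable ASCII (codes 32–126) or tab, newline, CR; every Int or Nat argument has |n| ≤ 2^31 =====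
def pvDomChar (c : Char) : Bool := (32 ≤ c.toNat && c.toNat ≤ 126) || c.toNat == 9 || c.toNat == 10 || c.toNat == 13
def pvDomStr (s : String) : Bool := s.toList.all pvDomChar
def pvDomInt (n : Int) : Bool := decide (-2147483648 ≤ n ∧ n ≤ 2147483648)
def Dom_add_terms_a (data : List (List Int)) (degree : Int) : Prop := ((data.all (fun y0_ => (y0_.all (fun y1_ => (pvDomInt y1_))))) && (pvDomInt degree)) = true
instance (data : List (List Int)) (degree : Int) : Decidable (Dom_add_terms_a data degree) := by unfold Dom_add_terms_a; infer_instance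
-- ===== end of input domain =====

-- B builds each output column directly instead of building the row-feature matrix and
-- transposing it through a dict-append double loop (objective: simpler).

-- ===== PORT A =====
def add_terms_a (data : List (List Int)) (degree : Int) : List (String × List Int) :=
  let adjusted : List (List Int) :=
    (PySem.List.pyRange 0 (PySem.List.len data) 1).map (fun x =>
      ((PySem.List.pyRange 0 (degree + 1) 1).map (fun i =>
          (PySem.List.pyGetD (PySem.List.pyGetD data x []) 0 0 : Int) ^ i.toNat))
        ++ [PySem.List.pyGetD (PySem.List.pyGetD data x []) 1 0])
  let dd : PySem.Dict String (List Int) :=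
    (PySem.List.pyRange 0 (PySem.List.len adjusted) 1).foldl (fun d x =>
      (PySem.List.pyRange 0 (PySem.List.len (PySem.List.pyGetD adjusted 0 [])) 1).foldl (fun d y =>
        match d.get? (PySem.Int.toStr y) with
        | some v => d.insert (PySem.Int.toStr y)
            (v ++ [PySem.List.pyGetD (PySem.List.pyGetD adjusted x []) y 0])
        | none => d.insert (PySem.Int.toStr y)
            [PySem.List.pyGetD (PySem.List.pyGetD adjusted x []) y 0]) d)
      PySem.Dict.empty
  dd.items

-- ===== PORT B =====
def add_terms_a_alt (data : List (List Int)) (degree : Int) : List (String × List Int) :=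
  if data = [] then []
  else
    let k : Nat := (max (degree + 1) 0).toNat
    ((List.range k).map (fun (j : Nat) =>
        (PySem.Int.toStr (j : Int), data.map (fun row => (PySem.List.pyGetD row 0 0 : Int) ^ j))))
      ++ [(PySem.Int.toStr (k : Int), data.map (fun row => PySem.List.pyGetD row 1 0))]

-- ===== PRECONDITION & SPEC =====
-- Pre_ excludes rows with fewer than 2 entries, on which the Python A raises IndexError (row[1]).
def Pre_add_terms_a (data : List (List Int)) (degree : Int) : Prop :=
  ∀ row ∈ data, 2 ≤ row.length
instance (data : List (List Int)) (degree : Int) : Decidable (Pre_add_terms_a data degree) := by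
  unfold Pre_add_terms_a; infer_instance
def pvWitness_add_terms_a : List (List Int) × Int := ([[1, 2], [3, 4]], 2)

def Spec_add_terms_a (data : List (List Int)) (degree : Int) (out : List (String × List Int)) : Prop := out = add_terms_a_alt data degree
instance (data : List (List Int)) (degree : Int) (out : List (String × List Int)) : Decidable (Spec_add_terms_a data degree out) := by unfold Spec_add_terms_a; infer_instance

-- ===== CLAIM (what is proved, stated in full; the proofs are below) =====
def Claim_equal_add_terms_a : Prop := ∀ (data : List (List Int)) (degree : Int), Dom_add_terms_a data degree → Pre_add_terms_a data degree → Spec_add_terms_a data degree (add_terms_a data degree)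

-- ===== LEMMAS AND PROOFS =====

-- decimal digits of a natural number, most significant first (Nat.toDigits 10 has no
-- injectivity lemma in Mathlib, so we characterise it by this structural function)
def pvDig (n : Nat) : List Char :=
  (if n < 10 then [] else pvDig (n / 10)) ++ [Nat.digitChar (n % 10)]
decreasing_by exact Nat.div_lt_self (by omega) (by norm_num)

theorem pvDig_eq (n : Nat) :
    pvDig n = (if n < 10 then [] else pvDig (n / 10)) ++ [Nat.digitChar (n % 10)] := by
  conv_lhs => rw [pvDig]

theorem pvDig_ne_nil (n : Nat) : pvDig n ≠ [] := by
  rw [pvDig_eq]; simp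

theorem pvDigitChar_inj (a b : Nat) (ha : a < 10) (hb : b < 10)
    (h : Nat.digitChar a = Nat.digitChar b) : a = b := by
  interval_cases a <;> interval_cases b <;> revert h <;> decide

theorem pvDig_inj : ∀ m k : Nat, pvDig m = pvDig k → m = k := by
  intro m
  induction m using Nat.strong_induction_on with
  | _ m ih =>
    intro k h
    rw [pvDig_eq m, pvDig_eq k] at h
    obtain ⟨h1, h2⟩ := List.append_inj' h (by simp)
    have hmod : m % 10 = k % 10 :=
      pvDigitChar_inj _ _ (Nat.mod_lt _ (by norm_num)) (Nat.mod_lt _ (by norm_num))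
        (List.head_eq_of_cons_eq h2)
    by_cases hm : m < 10 <;> by_cases hk : k < 10
    · omega
    · simp only [hm, hk, if_true, if_false] at h1
      exact absurd h1.symm (pvDig_ne_nil _)
    · simp only [hm, hk, if_true, if_false] at h1
      exact absurd h1 (pvDig_ne_nil _)
    · simp only [hm, hk, if_false] at h1
      have := ih (m / 10) (Nat.div_lt_self (by omega) (by norm_num)) (k / 10) h1
      omega

theorem pvToDigitsCore_eq : ∀ (f n : Nat) (acc : List Char), n < f →
    Nat.toDigitsCore 10 f n acc = pvDig n ++ acc := by
  intro f
  induction f with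
  | zero => omega
  | succ f ih =>
    intro n acc h
    rw [Nat.toDigitsCore]
    by_cases h10 : n < 10
    · have hz : n / 10 = 0 := Nat.div_eq_of_lt h10
      simp only [hz, if_true]
      rw [pvDig_eq]
      simp [h10]
    · have hne : ¬ (n / 10 = 0) := by
        intro hz
        exact h10 (by omega)
      simp only [hne, if_false]
      rw [ih (n / 10) _ (by
        have : n / 10 < n := Nat.div_lt_self (by omega) (by norm_num)
        omega)]
      rw [pvDig_eq n]
      simp [h10]

theorem pvToDigits_eq (n : Nat) : Nat.toDigits 10 n = pvDig n := by
  show Nat.toDigitsCore 10 (n + 1) n [] = pvDig n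
  rw [pvToDigitsCore_eq (n + 1) n [] (by omega), List.append_nil]

-- the dict key used by both ports, as a function of a natural column index
def pvKey (j : Nat) : String := PySem.Int.toStr (j : Int)

theorem pvKey_inj : Function.Injective pvKey := by
  intro a b h
  have h' : PySem.Int.toChars (a : Int) = PySem.Int.toChars (b : Int) := by
    rw [← PySem.Int.toList_toStr, ← PySem.Int.toList_toStr]
    unfold pvKey at h
    rw [h]
  unfold PySem.Int.toChars at h'
  rw [if_neg (by omega), if_neg (by omega)] at h'
  simp only [Int.toNat_natCast] at h'
  rw [pvToDigits_eq, pvToDigits_eq] at h'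
  exact pvDig_inj _ _ h'

-- one dict update of A's inner loop, on the pair (column index, value)
def pvEntryStep (d : PySem.Dict String (List Int)) (p : Int × Int) :
    PySem.Dict String (List Int) :=
  match d.get? (PySem.Int.toStr p.1) with
  | some v => d.insert (PySem.Int.toStr p.1) (v ++ [p.2])
  | none => d.insert (PySem.Int.toStr p.1) [p.2]

-- A's inner loop over one row, with the constant column count w
def pvRowStep (w : Nat) (d : PySem.Dict String (List Int)) (r : List Int) :
    PySem.Dict String (List Int) :=
  (PySem.List.pyRange 0 (w : Int) 1).foldl
    (fun d y => pvEntryStep d (y, PySem.List.pyGetD r y 0)) d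

theorem pvRowStep_eq_enum (w : Nat) (d : PySem.Dict String (List Int)) (r : List Int)
    (hr : r.length = w) :
    pvRowStep w d r = (PySem.List.enumerate r 0).foldl pvEntryStep d := by
  rw [PySem.List.enumerate_eq_map_pyRange (d := 0), List.foldl_map]
  unfold pvRowStep
  rw [PySem.List.len_eq, hr]

theorem pvShape_keys_nodup {w : Nat} {M : Nat → List Int} {d : PySem.Dict String (List Int)}
    (hd : d.items = (List.range w).map (fun j => (pvKey j, M j))) : d.keys.Nodup := by
  have hk : d.keys = (List.range w).map pvKey := by
    simp only [PySem.Dict.keys, hd, List.map_map]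
    rfl
  rw [hk]
  exact (List.nodup_range).map pvKey_inj

theorem pvShape_get? {w : Nat} {M : Nat → List Int} {d : PySem.Dict String (List Int)}
    (hd : d.items = (List.range w).map (fun j => (pvKey j, M j))) (j : Nat) (hj : j < w) :
    d.get? (pvKey j) = some (M j) := by
  refine PySem.Dict.get?_of_mem_items d ?_ (pvShape_keys_nodup hd)
  rw [hd]
  exact List.mem_map.2 ⟨j, List.mem_range.2 hj, rfl⟩

theorem pvShape_get?_none {w : Nat} {M : Nat → List Int} {d : PySem.Dict String (List Int)}
    (hd : d.items = (List.range w).map (fun j => (pvKey j, M j))) (j : Nat) (hj : w ≤ j) :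
    d.get? (pvKey j) = none := by
  rw [PySem.Dict.get?_eq_none_iff_not_mem_keys]
  have hk : d.keys = (List.range w).map pvKey := by
    simp only [PySem.Dict.keys, hd, List.map_map]
    rfl
  rw [hk]
  intro hmem
  obtain ⟨i, hi, hkey⟩ := List.mem_map.1 hmem
  have := pvKey_inj hkey
  rw [List.mem_range] at hi
  omega

-- filling fresh keys: A's inner loop on the FIRST row appends one new key per column
theorem pvFill : ∀ (r : List Int) (s : Nat) (M : Nat → List Int)
    (d : PySem.Dict String (List Int)),
    d.items = (List.range s).map (fun j => (pvKey j, M j)) →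
    ((PySem.List.enumerate r (s : Int)).foldl pvEntryStep d).items
      = (List.range (s + r.length)).map (fun j =>
          (pvKey j, if j < s then M j else [r.getD (j - s) 0])) := by
  intro r
  induction r with
  | nil =>
    intro s M d hd
    rw [PySem.List.enumerate_nil]
    simp only [List.foldl_nil, List.length_nil, Nat.add_zero, hd]
    refine List.map_congr_left (fun j hj => ?_)
    rw [List.mem_range] at hj
    simp [hj]
  | cons v rest ih =>
    intro s M d hd
    rw [PySem.List.enumerate_cons]
    simp only [List.foldl_cons]
    have hnone : d.get? (pvKey s) = none := pvShape_get?_none hd s le_rfl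
    have hcont : d.contains (pvKey s) = false := by
      rw [PySem.Dict.contains_eq_isSome_get?, hnone]
      rfl
    have hstep : (pvEntryStep d ((s : Int), v)).items
        = (List.range (s + 1)).map (fun j => (pvKey j, if j < s then M j else [v])) := by
      unfold pvEntryStep
      simp only
      rw [show PySem.Int.toStr ((s : Int), v).1 = pvKey s from rfl, hnone,
        PySem.Dict.items_insert_of_not_contains d _ hcont, hd, List.range_succ,
        List.map_append]
      refine congrArg₂ _ (List.map_congr_left fun j hj => ?_) ?_
      · rw [List.mem_range] at hj
        simp [hj]
      · simp
    have hcast : (s : Int) + 1 = ((s + 1 : Nat) : Int) := by push_cast; ring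
    rw [hcast, ih (s + 1) (fun j => if j < s then M j else [v]) _ hstep]
    simp only [List.length_cons]
    rw [show s + (rest.length + 1) = s + 1 + rest.length by omega]
    refine List.map_congr_left fun j hj => ?_
    rw [List.mem_range] at hj
    by_cases h1 : j < s
    · rw [if_pos (by omega), if_pos h1, if_pos h1]
    · by_cases h2 : j = s
      · subst h2
        rw [if_pos (by omega), if_neg h1, if_neg h1]
        simp
      · rw [if_neg (by omega), if_neg h1,
          show j - s = (j - (s + 1)) + 1 by omega, List.getD_cons_succ]

-- appending to existing keys: A's inner loop on a LATER row appends one value per column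
theorem pvAppendFill : ∀ (r : List Int) (s w : Nat) (M : Nat → List Int)
    (d : PySem.Dict String (List Int)),
    d.items = (List.range w).map (fun j => (pvKey j, M j)) → s + r.length = w →
    ((PySem.List.enumerate r (s : Int)).foldl pvEntryStep d).items
      = (List.range w).map (fun j =>
          (pvKey j, if s ≤ j then M j ++ [r.getD (j - s) 0] else M j)) := by
  intro r
  induction r with
  | nil =>
    intro s w M d hd hw
    have hw' : s = w := by simpa using hw
    rw [PySem.List.enumerate_nil]
    simp only [List.foldl_nil, hd]
    refine List.map_congr_left fun j hj => ?_
    rw [List.mem_range] at hj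
    rw [if_neg (by omega)]
  | cons v rest ih =>
    intro s w M d hd hw
    rw [PySem.List.enumerate_cons]
    simp only [List.foldl_cons]
    have hs : s < w := by simp at hw; omega
    have hsome : d.get? (pvKey s) = some (M s) := pvShape_get? hd s hs
    have hcont : d.contains (pvKey s) = true := by
      rw [PySem.Dict.contains_eq_isSome_get?, hsome]
      rfl
    have hstep : (pvEntryStep d ((s : Int), v)).items
        = (List.range w).map (fun j => (pvKey j, if j = s then M s ++ [v] else M j)) := by
      unfold pvEntryStep
      simp only
      rw [show PySem.Int.toStr ((s : Int), v).1 = pvKey s from rfl, hsome,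
        PySem.Dict.items_insert_of_contains d _ hcont, hd, List.map_map]
      refine List.map_congr_left fun j hj => ?_
      by_cases h : j = s
      · subst h
        simp
      · have hne : pvKey j ≠ pvKey s := fun hk => h (pvKey_inj hk)
        simp only [Function.comp_apply]
        rw [if_neg (by simpa using hne), if_neg h]
    have hcast : (s : Int) + 1 = ((s + 1 : Nat) : Int) := by push_cast; ring
    rw [hcast, ih (s + 1) w (fun j => if j = s then M s ++ [v] else M j) _ hstep
      (by simp at hw ⊢; omega)]
    refine List.map_congr_left fun j hj => ?_
    rw [List.mem_range] at hj
    by_cases h1 : j < s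
    · rw [if_neg (by omega), if_neg (by omega), if_neg (by omega)]
    · by_cases h2 : j = s
      · subst h2
        rw [if_neg (by omega), if_pos rfl, if_pos (le_refl _)]
        simp
      · rw [if_pos (by omega), if_neg h2, if_pos (by omega),
          show j - s = (j - (s + 1)) + 1 by omega, List.getD_cons_succ]

-- folding A's row loop over the remaining rows appends each row's entries column-wise
theorem pvRows : ∀ (rows : List (List Int)) (w : Nat) (M : Nat → List Int)
    (d : PySem.Dict String (List Int)),
    d.items = (List.range w).map (fun j => (pvKey j, M j)) →
    (∀ r ∈ rows, r.length = w) →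
    ((rows.foldl (pvRowStep w) d)).items
      = (List.range w).map (fun j =>
          (pvKey j, M j ++ rows.map (fun r => r.getD j 0))) := by
  intro rows
  induction rows with
  | nil =>
    intro w M d hd _
    simp only [List.foldl_nil, List.map_nil, List.append_nil, hd]
  | cons r rest ih =>
    intro w M d hd hlen
    simp only [List.foldl_cons]
    have hr : r.length = w := hlen r (List.mem_cons_self)
    have hstep : (pvRowStep w d r).items
        = (List.range w).map (fun j => (pvKey j, M j ++ [r.getD j 0])) := by
      rw [pvRowStep_eq_enum w d r hr,
        show (0 : Int) = ((0 : Nat) : Int) from rfl,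
        pvAppendFill r 0 w M d hd (by omega)]
      refine List.map_congr_left fun j hj => ?_
      simp
    rw [ih w (fun j => M j ++ [r.getD j 0]) _ hstep (fun t ht => hlen t (List.mem_cons_of_mem _ ht))]
    refine List.map_congr_left fun j hj => ?_
    simp [List.append_assoc]

-- B's feature row, as A builds it
def pvRowf (degree : Int) (row : List Int) : List Int :=
  (List.range (degree + 1).toNat).map (fun j => (PySem.List.pyGetD row 0 0 : Int) ^ j)
    ++ [PySem.List.pyGetD row 1 0]

theorem pvRowf_length (degree : Int) (row : List Int) :
    (pvRowf degree row).length = (degree + 1).toNat + 1 := by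
  simp [pvRowf]

theorem pvRowf_getD_lt (degree : Int) (t : List Int) {j : Nat}
    (hj : j < (degree + 1).toNat) :
    (pvRowf degree t).getD j 0 = (PySem.List.pyGetD t 0 0 : Int) ^ j := by
  unfold pvRowf
  rw [List.getD_append _ _ _ j (by simpa using hj)]
  rw [List.getD_eq_getElem?_getD, List.getElem?_map, List.getElem?_range hj]
  rfl

theorem pvRowf_getD_last (degree : Int) (t : List Int) :
    (pvRowf degree t).getD (degree + 1).toNat 0 = PySem.List.pyGetD t 1 0 := by
  unfold pvRowf
  rw [List.getD_eq_getElem?_getD, List.getElem?_append_right (by simp)]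
  simp

theorem pvAdjusted (data : List (List Int)) (degree : Int) :
    (PySem.List.pyRange 0 (PySem.List.len data) 1).map (fun x =>
      ((PySem.List.pyRange 0 (degree + 1) 1).map (fun i =>
          (PySem.List.pyGetD (PySem.List.pyGetD data x []) 0 0 : Int) ^ i.toNat))
        ++ [PySem.List.pyGetD (PySem.List.pyGetD data x []) 1 0])
    = data.map (pvRowf degree) := by
  have h1 : ∀ row : List Int,
      ((PySem.List.pyRange 0 (degree + 1) 1).map (fun i =>
          (PySem.List.pyGetD row 0 0 : Int) ^ i.toNat))
        ++ [PySem.List.pyGetD row 1 0] = pvRowf degree row := by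
    intro row
    unfold pvRowf
    congr 1
    rw [PySem.List.pyRange_one, List.map_map]
    refine (List.map_congr_left fun k _ => ?_).trans (by rw [Int.sub_zero])
    simp
  rw [PySem.List.len_eq,
    show (fun x => ((PySem.List.pyRange 0 (degree + 1) 1).map (fun i =>
          (PySem.List.pyGetD (PySem.List.pyGetD data x []) 0 0 : Int) ^ i.toNat))
        ++ [PySem.List.pyGetD (PySem.List.pyGetD data x []) 1 0])
      = (fun x => pvRowf degree (PySem.List.pyGetD data x [])) from funext fun x => h1 _]
  conv_rhs => rw [← PySem.List.map_pyGetD_pyRange_zero' data []]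
  rw [List.map_map]
  rfl

theorem pvAlt_cons (r : List Int) (rest : List (List Int)) (degree : Int) :
    add_terms_a_alt (r :: rest) degree
      = ((List.range (degree + 1).toNat).map (fun j =>
          (pvKey j, (r :: rest).map (fun row => (PySem.List.pyGetD row 0 0 : Int) ^ j))))
        ++ [(pvKey (degree + 1).toNat, (r :: rest).map (fun row => PySem.List.pyGetD row 1 0))] := by
  have hk : (max (degree + 1) 0).toNat = (degree + 1).toNat := by omega
  simp [add_terms_a_alt, pvKey, hk]

theorem pvMain (data : List (List Int)) (degree : Int) :
    add_terms_a data degree = add_terms_a_alt data degree := by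
  unfold add_terms_a
  simp only [pvAdjusted]
  cases data with
  | nil =>
    simp [add_terms_a_alt]
    rfl
  | cons r rest =>
    have hhead : PySem.List.pyGetD ((r :: rest).map (pvRowf degree)) 0 [] = pvRowf degree r := by
      rw [List.map_cons]
      exact PySem.List.pyGetD_zero_cons _ _ _
    have hWlen : PySem.List.len (PySem.List.pyGetD ((r :: rest).map (pvRowf degree)) 0 [])
        = (((degree + 1).toNat + 1 : Nat) : Int) := by
      rw [hhead, PySem.List.len_eq, pvRowf_length]
    simp only [hWlen]
    have hbody : (fun (d : PySem.Dict String (List Int)) (x : Int) =>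
        (PySem.List.pyRange 0 (((degree + 1).toNat + 1 : Nat) : Int) 1).foldl (fun d y =>
          match d.get? (PySem.Int.toStr y) with
          | some v => d.insert (PySem.Int.toStr y)
              (v ++ [PySem.List.pyGetD (PySem.List.pyGetD ((r :: rest).map (pvRowf degree)) x []) y 0])
          | none => d.insert (PySem.Int.toStr y)
              [PySem.List.pyGetD (PySem.List.pyGetD ((r :: rest).map (pvRowf degree)) x []) y 0]) d)
        = (fun d x => pvRowStep ((degree + 1).toNat + 1) d
            (PySem.List.pyGetD ((r :: rest).map (pvRowf degree)) x [])) := rfl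
    rw [hbody]
    rw [PySem.List.len_eq,
      PySem.List.foldl_pyRange_zero_pyGetD' ((r :: rest).map (pvRowf degree)) []
        (pvRowStep ((degree + 1).toNat + 1)) PySem.Dict.empty]
    have hfirst : (pvRowStep ((degree + 1).toNat + 1) PySem.Dict.empty (pvRowf degree r)).items
        = (List.range ((degree + 1).toNat + 1)).map
            (fun j => (pvKey j, [(pvRowf degree r).getD j 0])) := by
      rw [pvRowStep_eq_enum _ _ _ (pvRowf_length degree r)]
      conv_lhs => rw [show (0 : Int) = ((0 : Nat) : Int) from rfl]
      rw [pvFill (pvRowf degree r) 0 (fun _ => []) PySem.Dict.empty rfl]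
      rw [pvRowf_length]
      simp
    rw [List.map_cons, List.foldl_cons,
      pvRows (rest.map (pvRowf degree)) ((degree + 1).toNat + 1)
        (fun j => [(pvRowf degree r).getD j 0]) _ hfirst
        (by
          intro t ht
          obtain ⟨t0, _, rfl⟩ := List.mem_map.1 ht
          exact pvRowf_length degree t0),
      pvAlt_cons, List.range_succ, List.map_append]
    congr 1
    · refine List.map_congr_left fun j hj => ?_
      rw [List.mem_range] at hj
      refine congrArg (fun l => (pvKey j, l)) ?_
      rw [List.singleton_append, List.map_map]
      show ((r :: rest).map (fun t => (pvRowf degree t).getD j 0)) = _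
      exact List.map_congr_left fun t _ => pvRowf_getD_lt degree t hj
    · simp only [List.map_cons, List.map_nil]
      refine congrArg (fun p => [p]) (congrArg (fun l => (pvKey (degree + 1).toNat, l)) ?_)
      rw [List.singleton_append, List.map_map]
      show ((r :: rest).map (fun t => (pvRowf degree t).getD (degree + 1).toNat 0)) = _
      exact List.map_congr_left fun t _ => pvRowf_getD_last degree t

-- ===== VERDICT (by name: the statement is the Claim_ definition above) =====
theorem add_terms_a_spec : Claim_equal_add_terms_a := by
  intro data degree _ _
  unfold Spec_add_terms_a
  exact pvMain data degree
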